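-- pv_equiv track=rewrite | github.com/jeanbaptistemora/fluidattacks-universe2 | django-apps/integrates-back-async/backend/utils/findings.py | get_tracking_dict
-- ===== SOURCE A (Python) =====
-- from typing import Dict, List, Union, cast, Tuple
--
-- def get_tracking_dict(unique_dict: Dict[str, Dict[str, str]]) -> \
--         Dict[str, Dict[str, str]]:
--     """Get tracking dictionary."""
--     sorted_dates = sorted(unique_dict.keys())
--     tracking_dict = {}
--     if sorted_dates:
--         tracking_dict[sorted_dates[0]] = unique_dict[sorted_dates[0]]
--         for date in range(1, len(sorted_dates)):
--             prev_date = sorted_dates[date - 1]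
--             tracking_dict[sorted_dates[date]] = tracking_dict[prev_date].copy()
--             actual_date_dict = list(unique_dict[sorted_dates[date]].items())
--             for vuln, state in actual_date_dict:
--                 tracking_dict[sorted_dates[date]][vuln] = state
--     return tracking_dict
-- ===== SOURCE B (Python) =====
-- def get_tracking_dict(unique_dict):
--     """Get tracking dictionary."""
--     dates = sorted(unique_dict)
--     return {
--         date: {
--             vuln: state
--             for prior in dates[:index + 1]
--             for vuln, state in unique_dict[prior].items()
--         }
--         for index, date in enumerate(dates)
--     }
-- ===== Notes on version B (the rewrite author's own statement) =====
-- stated objective: alternative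
-- what changed: B has no incremental state at all: each date's snapshot is recomputed independently as one flat dict comprehension over the items of every date in the sorted prefix dates[:index+1], instead of A's loop that copies the previously stored snapshot back out of the output dict and merges the current date into it.
import Mathlib
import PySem

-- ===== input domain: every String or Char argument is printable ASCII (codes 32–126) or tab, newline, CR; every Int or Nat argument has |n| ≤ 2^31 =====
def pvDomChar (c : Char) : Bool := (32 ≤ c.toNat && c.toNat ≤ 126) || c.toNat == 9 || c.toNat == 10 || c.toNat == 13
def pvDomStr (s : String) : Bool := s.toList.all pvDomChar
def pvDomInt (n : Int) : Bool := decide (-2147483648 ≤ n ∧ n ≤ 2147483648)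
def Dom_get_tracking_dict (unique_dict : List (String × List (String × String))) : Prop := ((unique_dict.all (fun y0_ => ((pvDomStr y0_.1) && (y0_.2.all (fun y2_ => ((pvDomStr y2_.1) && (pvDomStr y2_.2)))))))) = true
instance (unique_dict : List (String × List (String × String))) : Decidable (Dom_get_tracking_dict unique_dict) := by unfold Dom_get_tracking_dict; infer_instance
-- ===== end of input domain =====

-- B keeps no incremental state: each date's snapshot is recomputed independently from the
-- sorted prefix dates[:index+1] by one flat dict comprehension (alternative decomposition,
-- stateless but quadratic in the number of dates).

-- ===== PORT A =====
def get_tracking_dict (unique_dict : List (String × List (String × String))) : List (String × List (String × String)) :=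
  let ud : PySem.Dict String (PySem.Dict String String) :=
    PySem.Dict.mk (unique_dict.map (fun (p : String × List (String × String)) => (p.1, PySem.Dict.mk p.2)))
  let sorted_dates : List String := PySem.List.sorted ud.keys (fun x => x) false
  let tracking_dict : PySem.Dict String (PySem.Dict String String) := PySem.Dict.empty
  let tracking_dict :=
    match sorted_dates with
    | [] => tracking_dict
    | d0 :: _ =>
      let tracking_dict := tracking_dict.insert d0 (ud.getD d0 PySem.Dict.empty)
      (PySem.List.pyRange 1 (sorted_dates.length : Int) 1).foldl (fun t date =>
        let prev_date := PySem.List.pyGetD sorted_dates (date - 1) ""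
        let cur := PySem.List.pyGetD sorted_dates date ""
        let t := t.insert cur (t.getD prev_date PySem.Dict.empty)   -- .copy() of the previous snapshot
        let actual_date_dict := (ud.getD cur PySem.Dict.empty).items
        actual_date_dict.foldl (fun t2 (p : String × String) =>
          t2.modify cur PySem.Dict.empty (fun dd => dd.insert p.1 p.2)) t) tracking_dict
  tracking_dict.items.map (fun (p : String × PySem.Dict String String) => (p.1, p.2.items))

-- ===== PORT B =====
-- the outer dict comprehension keys are the elements of `dates` in order, so it is a fold of
-- inserts into an empty dict; the inner flat comprehension is a fold of inserts over the
-- flattened items of the prefix dates[:index+1]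
def get_tracking_dict_alt (unique_dict : List (String × List (String × String))) : List (String × List (String × String)) :=
  let ud : PySem.Dict String (PySem.Dict String String) :=
    PySem.Dict.mk (unique_dict.map (fun (p : String × List (String × String)) => (p.1, PySem.Dict.mk p.2)))
  let dates : List String := PySem.List.sorted ud.keys (fun x => x) false
  let result : PySem.Dict String (PySem.Dict String String) :=
    (PySem.List.enumerate dates).foldl (fun t id =>
      t.insert id.2
        ((PySem.List.slice dates none (some (id.1 + 1))).foldl
          (fun (acc : PySem.Dict String String) prior =>
            (ud.getD prior PySem.Dict.empty).items.foldl
              (fun a (p : String × String) => a.insert p.1 p.2) acc)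
          PySem.Dict.empty)) PySem.Dict.empty
  result.items.map (fun (p : String × PySem.Dict String String) => (p.1, p.2.items))

-- ===== PRECONDITION & SPEC =====
-- Pre_ is the representation invariant of A's Python parameter type Dict[str, Dict[str, str]]:
-- the outer association list and every inner one have pairwise-distinct keys (every real Python
-- dict satisfies this; on raw lists with duplicate keys the two ports differ only in which
-- duplicate their dedup conventions keep, an artefact the dict-to-list encoding never produces).
def Pre_get_tracking_dict (unique_dict : List (String × List (String × String))) : Prop :=
  (unique_dict.map Prod.fst).Nodup ∧ ∀ p ∈ unique_dict, (p.2.map Prod.fst).Nodup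
instance (unique_dict : List (String × List (String × String))) : Decidable (Pre_get_tracking_dict unique_dict) := by unfold Pre_get_tracking_dict; infer_instance
def pvWitness_get_tracking_dict : (List (String × List (String × String))) :=
  [("2020-01-02", [("v2", "closed")]), ("2020-01-01", [("v1", "open"), ("v2", "open")])]
def Spec_get_tracking_dict (unique_dict : List (String × List (String × String))) (out : List (String × List (String × String))) : Prop := out = get_tracking_dict_alt unique_dict
instance (unique_dict : List (String × List (String × String))) (out : List (String × List (String × String))) : Decidable (Spec_get_tracking_dict unique_dict out) := by unfold Spec_get_tracking_dict; infer_instance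

-- ===== CLAIM (what is proved, stated in full; the proofs are below) =====
def Claim_equal_get_tracking_dict : Prop := ∀ (unique_dict : List (String × List (String × String))), Dom_get_tracking_dict unique_dict → Pre_get_tracking_dict unique_dict → Spec_get_tracking_dict unique_dict (get_tracking_dict unique_dict)

-- ===== LEMMAS AND PROOFS =====

-- proof-only intermediate: the single-accumulator run both programs are reduced to
def pvAccRun (ud : PySem.Dict String (PySem.Dict String String)) (ds : List String) :
    PySem.Dict String (PySem.Dict String String) × PySem.Dict String String :=
  ds.foldl (fun st date =>
      let acc := st.2.update (ud.getD date PySem.Dict.empty).items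
      (st.1.insert date acc, acc))
    (PySem.Dict.empty, PySem.Dict.empty)

-- proof-only: the list of (date, cumulative snapshot) pairs produced from a starting accumulator
def pvSnapList (ud : PySem.Dict String (PySem.Dict String String)) :
    List String → PySem.Dict String String → List (String × PySem.Dict String String)
  | [], _ => []
  | d :: r, acc =>
      let acc' := acc.update (ud.getD d PySem.Dict.empty).items
      (d, acc') :: pvSnapList ud r acc'

-- ---------- A-side: A's index loop equals the accumulator run ----------

-- A's inner mutation loop over the items of the current date, started on a dict whose key `cur`
-- was just (re)inserted, equals one insert of the merged snapshot.
theorem pv_inner_fold (l : List (String × String)) (t0 : PySem.Dict String (PySem.Dict String String))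
    (cur : String) (snap : PySem.Dict String String) :
    l.foldl (fun t2 p => t2.modify cur PySem.Dict.empty (fun dd => dd.insert p.1 p.2)) (t0.insert cur snap)
      = t0.insert cur (l.foldl (fun dd p => dd.insert p.1 p.2) snap) := by
  induction l generalizing snap with
  | nil => rfl
  | cons p rest ih =>
      simp only [List.foldl_cons]
      have h1 : (t0.insert cur snap).modify cur PySem.Dict.empty (fun dd => dd.insert p.1 p.2)
          = t0.insert cur (snap.insert p.1 p.2) := by
        show (t0.insert cur snap).insert cur (((t0.insert cur snap).getD cur PySem.Dict.empty).insert p.1 p.2)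
          = t0.insert cur (snap.insert p.1 p.2)
        rw [PySem.Dict.getD_insert_self, PySem.Dict.insert_insert_self]
      rw [h1, ih]

-- updating the empty dict with a duplicate-free association list reproduces it verbatim
theorem pv_update_empty (w : List (String × String)) (hw : (w.map Prod.fst).Nodup) :
    (PySem.Dict.empty.update w : PySem.Dict String String) = PySem.Dict.mk w := by
  apply PySem.Dict.ext
  show (w.foldl (fun d p => d.insert p.1 p.2) PySem.Dict.empty).items = w
  rw [PySem.Dict.items_foldl_insert_fresh (k := Prod.fst) (v := Prod.snd)
      (d := PySem.Dict.empty) (l := w) (by intro a _; rfl) hw]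
  simp [PySem.Dict.empty]

-- every value stored in the outer dict built from the input is the dict of one inner input list
theorem pv_values_shape (l : List (String × List (String × String))) (k : String)
    (dd : PySem.Dict String String)
    (h : (PySem.Dict.mk (l.map (fun (p : String × List (String × String)) => (p.1, PySem.Dict.mk p.2)))).get? k = some dd) :
    ∃ p ∈ l, dd = PySem.Dict.mk p.2 := by
  induction l with
  | nil => simp [PySem.Dict.get?] at h
  | cons q rest ih =>
      rw [List.map_cons, PySem.Dict.get?_mk_cons] at h
      by_cases hk : q.1 == k
      · simp [hk] at h
        exact ⟨q, List.mem_cons_self, h.symm⟩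
      · simp [hk] at h
        obtain ⟨p, hp, he⟩ := ih h
        exact ⟨p, List.mem_cons_of_mem _ hp, he⟩

-- the looked-up snapshot of any date equals the empty dict updated with its items (inner Nodup)
theorem pv_getD_eq_update (l : List (String × List (String × String)))
    (hpre : ∀ p ∈ l, (p.2.map Prod.fst).Nodup) (k : String) :
    PySem.Dict.empty.update
        (((PySem.Dict.mk (l.map (fun (p : String × List (String × String)) => (p.1, PySem.Dict.mk p.2)))).getD k PySem.Dict.empty).items)
      = (PySem.Dict.mk (l.map (fun (p : String × List (String × String)) => (p.1, PySem.Dict.mk p.2)))).getD k PySem.Dict.empty := by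
  rcases h : (PySem.Dict.mk (l.map (fun (p : String × List (String × String)) => (p.1, PySem.Dict.mk p.2)))).get? k with _ | dd
  · rw [PySem.Dict.getD_eq_get?_getD, h]; rfl
  · rw [PySem.Dict.getD_eq_get?_getD, h]
    obtain ⟨p, hp, he⟩ := pv_values_shape l k dd h
    subst he
    exact pv_update_empty p.2 (hpre p hp)

-- the main chain: A's index loop from position k equals the accumulator fold over the dates
-- dropped to position k, provided A's dict already stores the accumulator at the previous date
theorem pv_chain (ud : PySem.Dict String (PySem.Dict String String)) (ds : List String) :
    ∀ (m k : Nat) (t : PySem.Dict String (PySem.Dict String String))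
      (acc : PySem.Dict String String),
      1 ≤ k → k + m = ds.length →
      t.getD (ds.getD (k - 1) "") PySem.Dict.empty = acc →
      (PySem.List.pyRange (k : Int) (ds.length : Int) 1).foldl (fun t date =>
          let prev_date := PySem.List.pyGetD ds (date - 1) ""
          let cur := PySem.List.pyGetD ds date ""
          let t := t.insert cur (t.getD prev_date PySem.Dict.empty)
          let actual_date_dict := (ud.getD cur PySem.Dict.empty).items
          actual_date_dict.foldl (fun t2 (p : String × String) =>
            t2.modify cur PySem.Dict.empty (fun dd => dd.insert p.1 p.2)) t) t
        = ((ds.drop k).foldl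
            (fun (st : PySem.Dict String (PySem.Dict String String) × PySem.Dict String String) date =>
              let acc := st.2.update (ud.getD date PySem.Dict.empty).items
              (st.1.insert date acc, acc)) (t, acc)).1 := by
  intro m
  induction m with
  | zero =>
      intro k t acc hk hlen hacc
      have h1 : PySem.List.pyRange (k : Int) (ds.length : Int) 1 = [] := by
        simp [PySem.List.pyRange]; omega
      have h2 : ds.drop k = [] := List.drop_eq_nil_of_le (by omega)
      rw [h1, h2]
      rfl
  | succ m ih =>
      intro k t acc hk hlen hacc
      have hklt : k < ds.length := by omega
      have hr : PySem.List.pyRange (k : Int) (ds.length : Int) 1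
          = (k : Int) :: PySem.List.pyRange ((k : Int) + 1) (ds.length : Int) 1 :=
        PySem.List.pyRange_one_cons (by exact_mod_cast hklt)
      have hd : ds.drop k = ds[k] :: ds.drop (k + 1) := (List.getElem_cons_drop hklt).symm
      rw [hr, hd]
      simp only [List.foldl_cons]
      have hg1 : PySem.List.pyGetD ds ((k : Int) - 1) "" = ds.getD (k - 1) "" := by
        have h : (k : Int) - 1 = ((k - 1 : Nat) : Int) := by omega
        rw [h, PySem.List.pyGetD_natCast]
      have hg2 : PySem.List.pyGetD ds (k : Int) "" = ds[k] := by
        rw [PySem.List.pyGetD_natCast, List.getD_eq_getElem?_getD, List.getElem?_eq_getElem hklt]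
        rfl
      have hstep : List.foldl (fun t2 p => t2.modify (PySem.List.pyGetD ds (k : Int) "") PySem.Dict.empty
            (fun dd => dd.insert p.1 p.2))
          (t.insert (PySem.List.pyGetD ds (k : Int) "")
            (t.getD (PySem.List.pyGetD ds ((k : Int) - 1) "") PySem.Dict.empty))
          ((ud.getD (PySem.List.pyGetD ds (k : Int) "") PySem.Dict.empty).items)
          = t.insert ds[k] ((ud.getD ds[k] PySem.Dict.empty).items.foldl
              (fun dd p => dd.insert p.1 p.2) acc) := by
        rw [hg1, hg2, hacc]
        exact pv_inner_fold _ t ds[k] acc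
      rw [hstep]
      have hcast : (k : Int) + 1 = ((k + 1 : Nat) : Int) := by omega
      rw [hcast]
      exact ih (k + 1) _ (acc.update (ud.getD ds[k] PySem.Dict.empty).items) (by omega) (by omega)
        (by
          have h : ds.getD (k + 1 - 1) "" = ds[k] := by
            rw [Nat.add_sub_cancel, List.getD_eq_getElem?_getD, List.getElem?_eq_getElem hklt]; rfl
          rw [h, PySem.Dict.getD_insert_self]; rfl)

-- ---------- accumulator run vs. the (date, snapshot) list ----------

-- on pairwise-distinct dates none of which the dict holds yet, the accumulator run appends
-- exactly the (date, cumulative snapshot) pairs to the dict's items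
theorem pv_accRun_items (ud : PySem.Dict String (PySem.Dict String String)) :
    ∀ (ds : List String) (t : PySem.Dict String (PySem.Dict String String))
      (acc : PySem.Dict String String),
      ds.Nodup → (∀ d ∈ ds, t.contains d = false) →
      (ds.foldl (fun st date =>
          let a := st.2.update (ud.getD date PySem.Dict.empty).items
          (st.1.insert date a, a)) (t, acc)).1.items
        = t.items ++ pvSnapList ud ds acc := by
  intro ds
  induction ds with
  | nil => intro t acc _ _; simp [pvSnapList]
  | cons d r ih =>
      intro t acc hnd hfr
      simp only [List.foldl_cons]
      have hfr' : ∀ e ∈ r, ((t.insert d (acc.update (ud.getD d PySem.Dict.empty).items)).contains e) = false := by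
        intro e he
        rw [PySem.Dict.contains_insert]
        have hne : e ≠ d := fun h => (List.nodup_cons.mp hnd).1 (h ▸ he)
        simp [hne, hfr e (List.mem_cons_of_mem _ he)]
      rw [ih _ _ (List.nodup_cons.mp hnd).2 hfr']
      rw [PySem.Dict.items_insert_of_not_contains _ _ (hfr d List.mem_cons_self)]
      simp [pvSnapList]

-- the (date, snapshot) list equals the per-index prefix recomputation of B, generalized over
-- an already-consumed prefix `pre` whose merge is the starting accumulator
theorem pv_snap_general (ud : PySem.Dict String (PySem.Dict String String)) :
    ∀ (ds pre : List String),
      pvSnapList ud ds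
          (pre.foldl (fun acc prior => acc.update (ud.getD prior PySem.Dict.empty).items) PySem.Dict.empty)
        = (PySem.List.enumerate ds (pre.length : Int)).map (fun id =>
            (id.2, (PySem.List.slice (pre ++ ds) none (some (id.1 + 1))).foldl
              (fun acc prior => acc.update (ud.getD prior PySem.Dict.empty).items) PySem.Dict.empty)) := by
  intro ds
  induction ds with
  | nil => intro pre; simp [pvSnapList, PySem.List.enumerate]
  | cons d r ih =>
      intro pre
      simp only [PySem.List.enumerate_cons, List.map_cons]
      have hc : ((pre.length : Int) + 1) = (((pre.length + 1 : Nat)) : Int) := by push_cast; ring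
      have hhead : (PySem.List.slice (pre ++ d :: r) none (some ((pre.length : Int) + 1))).foldl
            (fun acc prior => acc.update (ud.getD prior PySem.Dict.empty).items) PySem.Dict.empty
          = (pre.foldl (fun acc prior => acc.update (ud.getD prior PySem.Dict.empty).items)
              PySem.Dict.empty).update (ud.getD d PySem.Dict.empty).items := by
        rw [hc, PySem.List.slice_to_natCast]
        have htake : (pre ++ d :: r).take (pre.length + 1) = pre ++ [d] := by
          have h1 : pre ++ d :: r = (pre ++ [d]) ++ r := by simp
          have h2 : pre.length + 1 = (pre ++ [d]).length := by simp
          rw [h1, h2, List.take_left]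
        rw [htake, List.foldl_append]
        rfl
      have htail := ih (pre ++ [d])
      rw [List.foldl_append] at htail
      simp only [List.foldl_cons, List.foldl_nil, List.append_assoc, List.singleton_append,
        List.length_append, List.length_cons, List.length_nil, Nat.zero_add] at htail
      push_cast at htail
      show (d, _) :: pvSnapList ud r _ = _
      rw [hhead, htail]

-- the sorted key list of the outer dict has no duplicates (outer Nodup of Pre_)
theorem pv_dates_nodup (l : List (String × List (String × String)))
    (h : (l.map Prod.fst).Nodup) :
    (PySem.List.sorted (PySem.Dict.mk (l.map
        (fun (p : String × List (String × String)) => (p.1, PySem.Dict.mk p.2)))).keys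
      (fun x => x) false).Nodup := by
  apply (PySem.List.sorted_perm _ _ _).nodup_iff.mpr
  show ((l.map _).map Prod.fst).Nodup
  rw [List.map_map]
  exact h

-- A equals the accumulator run (old-style chain proof)
theorem pv_a_eq_accRun (l : List (String × List (String × String)))
    (hpre : ∀ p ∈ l, (p.2.map Prod.fst).Nodup) :
    get_tracking_dict l
      = (pvAccRun (PySem.Dict.mk (l.map (fun (p : String × List (String × String)) => (p.1, PySem.Dict.mk p.2))))
          (PySem.List.sorted (PySem.Dict.mk (l.map
            (fun (p : String × List (String × String)) => (p.1, PySem.Dict.mk p.2)))).keys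
            (fun x => x) false)).1.items.map
          (fun (p : String × PySem.Dict String String) => (p.1, p.2.items)) := by
  simp only [get_tracking_dict, pvAccRun]
  generalize PySem.List.sorted (PySem.Dict.mk (l.map
      (fun (p : String × List (String × String)) => (p.1, PySem.Dict.mk p.2)))).keys
      (fun x => x) false = ds
  cases ds with
  | nil => rfl
  | cons d0 rest =>
      have hchain := pv_chain (PySem.Dict.mk (l.map
          (fun (p : String × List (String × String)) => (p.1, PySem.Dict.mk p.2))))
          (d0 :: rest) rest.length 1
          (PySem.Dict.empty.insert d0 ((PySem.Dict.mk (l.map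
            (fun (p : String × List (String × String)) => (p.1, PySem.Dict.mk p.2)))).getD d0 PySem.Dict.empty))
          ((PySem.Dict.mk (l.map
            (fun (p : String × List (String × String)) => (p.1, PySem.Dict.mk p.2)))).getD d0 PySem.Dict.empty)
          (by omega) (by simp [Nat.add_comm])
          (by simp [PySem.Dict.getD_insert_self])
      simp only [List.drop_one, List.tail_cons, Nat.cast_one] at hchain
      simp only [List.foldl_cons]
      rw [pv_getD_eq_update l hpre d0]  -- the first accumulator is the stored first snapshot
      rw [hchain]

-- ===== VERDICT (by name: the statement is the Claim_ definition above) =====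
theorem get_tracking_dict_spec : Claim_equal_get_tracking_dict := by
  intro l _ hpre
  show get_tracking_dict l = get_tracking_dict_alt l
  obtain ⟨houter, hinner⟩ := hpre
  rw [pv_a_eq_accRun l hinner]
  simp only [get_tracking_dict_alt, pvAccRun]
  generalize hds : PySem.List.sorted (PySem.Dict.mk (l.map
      (fun (p : String × List (String × String)) => (p.1, PySem.Dict.mk p.2)))).keys
      (fun x => x) false = ds
  have hnd : ds.Nodup := hds ▸ pv_dates_nodup l houter
  -- A side: the accumulator run's items are the (date, snapshot) list
  rw [pv_accRun_items _ ds PySem.Dict.empty PySem.Dict.empty hnd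
    (fun d _ => PySem.Dict.contains_empty d)]
  -- B side: the insert loop over distinct fresh keys appends its (key, value) pairs
  rw [PySem.Dict.items_foldl_insert_fresh (l := PySem.List.enumerate ds 0)
      (k := fun id => id.2)
      (v := fun id => (PySem.List.slice ds none (some (id.1 + 1))).foldl
        (fun acc prior => ((PySem.Dict.mk (l.map
          (fun (p : String × List (String × String)) => (p.1, PySem.Dict.mk p.2)))).getD prior PySem.Dict.empty).items.foldl
            (fun a (p : String × String) => a.insert p.1 p.2) acc)
        PySem.Dict.empty)
      (d := PySem.Dict.empty)
      (fun a _ => PySem.Dict.contains_empty a.2)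
      (by rw [PySem.List.map_snd_enumerate]; exact hnd)]
  -- both sides are now maps of the same (date, snapshot) list
  have hsnap := pv_snap_general (PySem.Dict.mk (l.map
      (fun (p : String × List (String × String)) => (p.1, PySem.Dict.mk p.2)))) ds []
  simp only [List.foldl_nil, List.nil_append, List.length_nil, Nat.cast_zero] at hsnap
  have hempty : (PySem.Dict.empty : PySem.Dict String (PySem.Dict String String)).items = [] := rfl
  rw [hempty, List.nil_append, List.nil_append, hsnap]
  rfl
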